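-- pv_equiv track=rewrite | github.com/DevAdora/ojt | RecursionActs/BonusActivity.py | fibonacci_steps
-- ===== SOURCE A (Python) =====
-- def fibonacci_steps(n):
--     if n <= 0:
--         return "Please enter a positive integer"
--     steps = []
--     a, b = 0, 1
--     for i in range(n):
--         steps.append(f"{a} + {b} = {a + b}")
--         a, b = b, a + b
--     return steps
-- ===== SOURCE B (Python) =====
-- def _fib_pair(k):
--     # fast doubling: returns (F(k), F(k+1))
--     if k == 0:
--         return (0, 1)
--     a, b = _fib_pair(k >> 1)
--     c = a * (2 * b - a)
--     d = a * a + b * b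
--     if k & 1:
--         return (d, c + d)
--     return (c, d)
--
--
-- def fibonacci_steps(n):
--     if n <= 0:
--         return "Please enter a positive integer"
--     out = []
--     for i in range(n):
--         a, b = _fib_pair(i)
--         out.append(f"{a} + {b} = {a + b}")
--     return out
-- ===== Notes on version B (the rewrite author's own statement) =====
-- stated objective: alternative
-- what changed: B computes each step's Fibonacci pair (F(i), F(i+1)) independently with the recursive fast-doubling identities F(2k)=F(k)(2F(k+1)-F(k)) and F(2k+1)=F(k)^2+F(k+1)^2, instead of rolling the linear recurrence a,b = b,a+b across the loop; no sequential recurrence state is carried between steps.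
-- outside the precondition, e.g. on fibonacci_steps(0): A returns 'Please enter a positive integer', B returns 'Please enter a positive integer'
import Mathlib
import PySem

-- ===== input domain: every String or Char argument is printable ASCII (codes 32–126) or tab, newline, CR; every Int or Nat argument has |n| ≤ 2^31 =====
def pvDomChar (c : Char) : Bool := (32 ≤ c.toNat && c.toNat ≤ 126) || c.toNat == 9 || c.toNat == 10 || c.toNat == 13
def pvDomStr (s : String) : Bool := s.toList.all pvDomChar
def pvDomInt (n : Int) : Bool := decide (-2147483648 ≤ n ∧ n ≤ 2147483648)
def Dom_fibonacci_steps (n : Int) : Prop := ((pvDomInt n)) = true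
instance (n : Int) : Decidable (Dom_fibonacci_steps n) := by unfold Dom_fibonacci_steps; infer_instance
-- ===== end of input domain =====

-- B computes each step's Fibonacci pair independently by recursive fast doubling
-- (F(2k)=F(k)(2F(k+1)-F(k)), F(2k+1)=F(k)^2+F(k+1)^2) instead of rolling the
-- linear recurrence a,b = b,a+b across the loop; objective: alternative algorithm.


-- ===== PORT A =====
-- f"{a} + {b} = {a + b}"
def fibStepStr (a b c : Int) : String :=
  PySem.Int.toStr a ++ " + " ++ PySem.Int.toStr b ++ " = " ++ PySem.Int.toStr c

def fibonacci_steps (n : Int) : List String :=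
  if n ≤ 0 then []  -- Python A returns the string "Please enter a positive integer" here, not a list; outside Pre_
  else
    ((PySem.List.pyRange 0 n 1).foldl
      (fun (st : List String × Int × Int) _ =>
        (st.1 ++ [fibStepStr st.2.1 st.2.2 (st.2.1 + st.2.2)], st.2.2, st.2.1 + st.2.2))
      ([], 0, 1)).1

-- ===== PORT B =====
-- _fib_pair(k): fast doubling, returns (F(k), F(k+1)); k >> 1 = k / 2, k & 1 = k % 2
def fibPair (k : Nat) : Int × Int :=
  if _h : k = 0 then (0, 1)
  else
    let p := fibPair (k / 2)
    let a := p.1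
    let b := p.2
    let c := a * (2 * b - a)
    let d := a * a + b * b
    if k % 2 == 1 then (d, c + d) else (c, d)
decreasing_by omega

-- B's loop indices i come from range(n), so i ≥ 0 and i.toNat is exact
def fibonacci_steps_alt (n : Int) : List String :=
  if n ≤ 0 then []  -- Python B returns the same sentinel string here; outside Pre_
  else
    (PySem.List.pyRange 0 n 1).foldl
      (fun out i =>
        let p := fibPair i.toNat
        out ++ [fibStepStr p.1 p.2 (p.1 + p.2)])
      []

-- ===== PRECONDITION & SPEC =====
-- Pre_ excludes n ≤ 0, where Python A returns the string "Please enter a positive integer"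
-- instead of a list of strings (a value outside the declared return type List String).
def Pre_fibonacci_steps (n : Int) : Prop := 1 ≤ n
instance (n : Int) : Decidable (Pre_fibonacci_steps n) := by unfold Pre_fibonacci_steps; infer_instance
def pvWitness_fibonacci_steps : Int := 3

def Spec_fibonacci_steps (n : Int) (out : List String) : Prop := out = fibonacci_steps_alt n
instance (n : Int) (out : List String) : Decidable (Spec_fibonacci_steps n out) := by unfold Spec_fibonacci_steps; infer_instance

-- ===== CLAIM (what is proved, stated in full; the proofs are below) =====
def Claim_equal_fibonacci_steps : Prop := ∀ (n : Int), Dom_fibonacci_steps n → Pre_fibonacci_steps n → Spec_fibonacci_steps n (fibonacci_steps n)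

-- ===== LEMMAS AND PROOFS =====

-- fast doubling is correct
lemma fibPair_eq (k : Nat) : fibPair k = ((Nat.fib k : Int), (Nat.fib (k + 1) : Int)) := by
  induction k using Nat.strong_induction_on with
  | _ k ih =>
    by_cases h0 : k = 0
    · subst h0; simp [fibPair]
    · set m := k / 2 with hm
      have ihm := ih m (by omega)
      have hle : Nat.fib m ≤ 2 * Nat.fib (m + 1) :=
        le_trans Nat.fib_le_fib_succ (by omega)
      have heven : (Nat.fib (2 * m) : Int)
          = (Nat.fib m : Int) * (2 * (Nat.fib (m + 1) : Int) - (Nat.fib m : Int)) := by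
        rw [Nat.fib_two_mul]; push_cast [Nat.cast_sub hle]; ring
      have hodd : (Nat.fib (2 * m + 1) : Int)
          = (Nat.fib m : Int) * (Nat.fib m : Int)
            + (Nat.fib (m + 1) : Int) * (Nat.fib (m + 1) : Int) := by
        rw [Nat.fib_two_mul_add_one]; push_cast; ring
      rw [fibPair, dif_neg h0, ← hm, ihm]
      rcases Nat.even_or_odd k with he | ho
      · obtain ⟨t, ht⟩ := he
        have hmt : m = t := by omega
        have hk2 : k % 2 = 0 := by omega
        subst hmt
        simp only [hk2]
        rw [show k = 2 * m by omega, show 2 * m + 1 = 2 * m + 1 from rfl]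
        simp [heven, hodd]
      · obtain ⟨t, ht⟩ := ho
        have hmt : m = t := by omega
        have hk2 : k % 2 = 1 := by omega
        subst hmt
        simp only [hk2]
        rw [show k = 2 * m + 1 by omega]
        have hnext : (Nat.fib (2 * m + 1 + 1) : Int)
            = (Nat.fib (2 * m) : Int) + (Nat.fib (2 * m + 1) : Int) := by
          rw [Nat.fib_add_two]; push_cast; ring
        simp [heven, hodd, hnext]

-- A's loop state after the whole range
lemma loopA (m : Nat) :
    (PySem.List.pyRange 0 (m : Int) 1).foldl
      (fun (st : List String × Int × Int) _ =>
        (st.1 ++ [fibStepStr st.2.1 st.2.2 (st.2.1 + st.2.2)], st.2.2, st.2.1 + st.2.2))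
      ([], 0, 1)
    = ((List.range m).map (fun k => fibStepStr (Nat.fib k) (Nat.fib (k + 1)) (Nat.fib (k + 2))),
       (Nat.fib m : Int), (Nat.fib (m + 1) : Int)) := by
  induction m with
  | zero => simp [PySem.List.pyRange_one_eq_nil]
  | succ m ih =>
    rw [show ((m + 1 : Nat) : Int) = (m : Int) + 1 by push_cast; ring,
        PySem.List.pyRange_one_succ_right (by positivity), List.foldl_append, ih]
    simp only [List.foldl_cons, List.foldl_nil]
    simp [List.range_succ, fibStepStr, Nat.fib_add_two]

-- B's loop accumulates the same list
lemma loopB (m : Nat) :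
    (PySem.List.pyRange 0 (m : Int) 1).foldl
      (fun out i =>
        let p := fibPair i.toNat
        out ++ [fibStepStr p.1 p.2 (p.1 + p.2)])
      []
    = (List.range m).map (fun k => fibStepStr (Nat.fib k) (Nat.fib (k + 1)) (Nat.fib (k + 2))) := by
  induction m with
  | zero => simp [PySem.List.pyRange_one_eq_nil]
  | succ m ih =>
    rw [show ((m + 1 : Nat) : Int) = (m : Int) + 1 by push_cast; ring,
        PySem.List.pyRange_one_succ_right (by positivity), List.foldl_append, ih]
    simp only [List.foldl_cons, List.foldl_nil]
    have : ((m : Int)).toNat = m := by omega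
    simp [List.range_succ, this, fibPair_eq, Nat.fib_add_two]

-- ===== VERDICT (by name: the statement is the Claim_ definition above) =====
theorem fibonacci_steps_spec : Claim_equal_fibonacci_steps := by
  intro n _ hpre
  unfold Pre_fibonacci_steps at hpre
  obtain ⟨m, rfl⟩ : ∃ m : Nat, n = (m : Int) := ⟨n.toNat, by omega⟩
  unfold Spec_fibonacci_steps fibonacci_steps fibonacci_steps_alt
  have hm : ¬ ((m : Int) ≤ 0) := by omega
  rw [if_neg hm, if_neg hm, loopA, loopB]
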